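-- pv_equiv track=rewrite | github.com/Alan222805/curso-Python | dia 5/proyecto dia 5/proyecto.py | mostrar_letras
-- ===== SOURCE A (Python) =====
-- def mostrar_letras(letra,indices, lista_guiones:list):
--     lista_mostrar = ''
--     for n in range(0, len(lista_guiones)):
--         for i in indices:
--             if i == n:
--                 lista_mostrar += letra
--                 break
--         else:
--             lista_mostrar+='_'
--
--     return lista_mostrar
-- ===== SOURCE B (Python) =====
-- def mostrar_letras(letra, indices, lista_guiones: list):
--     lista = ['_'] * len(lista_guiones)
--     for i in indices:
--         if 0 <= i < len(lista):
--             lista[i] = letra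
--     return ''.join(lista)
-- ===== Notes on version B (the rewrite author's own statement) =====
-- stated objective: idiomatic
-- what changed: B scatters the letter into a preallocated '_' buffer by iterating over the indices once and joins it, instead of A's scan of every position with an inner search through indices.
import Mathlib
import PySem

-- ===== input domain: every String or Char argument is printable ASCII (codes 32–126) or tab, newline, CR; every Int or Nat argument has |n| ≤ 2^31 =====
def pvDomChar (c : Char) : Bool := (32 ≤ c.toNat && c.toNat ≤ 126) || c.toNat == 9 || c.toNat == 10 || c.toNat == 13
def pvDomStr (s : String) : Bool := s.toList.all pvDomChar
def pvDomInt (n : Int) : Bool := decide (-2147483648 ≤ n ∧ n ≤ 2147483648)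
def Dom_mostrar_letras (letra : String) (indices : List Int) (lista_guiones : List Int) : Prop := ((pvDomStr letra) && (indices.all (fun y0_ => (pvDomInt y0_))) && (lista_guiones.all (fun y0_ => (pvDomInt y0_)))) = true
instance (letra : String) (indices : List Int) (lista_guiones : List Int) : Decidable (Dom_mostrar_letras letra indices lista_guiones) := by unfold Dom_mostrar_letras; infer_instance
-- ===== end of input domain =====

-- B scatters the letter into a preallocated '_' buffer over the indices (one pass) instead of A's per-position inner search; idiomatic/faster.


-- ===== PORT A =====
-- inner 'for i in indices: if i == n: acc += letra; break / else: acc += "_"'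
def mlInner (letra : String) (n : Int) : List Int → String
  | [] => "_"
  | i :: rest => if i == n then letra else mlInner letra n rest

def mostrar_letras (letra : String) (indices : List Int) (lista_guiones : List Int) : String :=
  (List.range lista_guiones.length).foldl
    (fun acc n => acc ++ mlInner letra (Int.ofNat n) indices) ""

-- ===== PORT B =====
def mostrar_letras_alt (letra : String) (indices : List Int) (lista_guiones : List Int) : String :=
  let len := lista_guiones.length
  let lista := indices.foldl
    (fun buf i => if 0 ≤ i ∧ i < (len : Int) then buf.set i.toNat letra else buf)
    (List.replicate len "_")
  String.join lista

-- ===== PRECONDITION & SPEC =====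
def Spec_mostrar_letras (letra : String) (indices : List Int) (lista_guiones : List Int) (out : String) : Prop := out = mostrar_letras_alt letra indices lista_guiones
instance (letra : String) (indices : List Int) (lista_guiones : List Int) (out : String) : Decidable (Spec_mostrar_letras letra indices lista_guiones out) := by unfold Spec_mostrar_letras; infer_instance

-- ===== CLAIM (what is proved, stated in full; the proofs are below) =====
def Claim_equal_mostrar_letras : Prop := ∀ (letra : String) (indices : List Int) (lista_guiones : List Int), Dom_mostrar_letras letra indices lista_guiones → Spec_mostrar_letras letra indices lista_guiones (mostrar_letras letra indices lista_guiones)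

-- ===== LEMMAS AND PROOFS =====

-- A's inner loop returns letra iff some index equals n
theorem mlInner_eq (letra : String) (n : Int) (indices : List Int) :
    mlInner letra n indices = if (n : Int) ∈ indices then letra else "_" := by
  induction indices with
  | nil => simp [mlInner]
  | cons i rest ih =>
    by_cases h : i = n
    · simp [mlInner, h]
    · have hni : ¬ n = i := fun h' => h h'.symm
      simp [mlInner, h, ih, List.mem_cons, hni]

-- folding ++ over a list of strings = prepending to its join
theorem foldl_str_append :
    ∀ (l : List String) (s : String), l.foldl (· ++ ·) s = s ++ String.join l := by
  intro l
  induction l with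
  | nil => intro s; simp [String.join]
  | cons x xs ih =>
    intro s
    simp only [List.foldl, String.join]
    rw [ih (s ++ x), ih ("" ++ x)]
    simp [String.append_assoc]

-- folding string concatenation of f = join of the mapped list
theorem foldl_append_join {α : Type} (f : α → String) (l : List α) (s : String) :
    l.foldl (fun acc x => acc ++ f x) s = s ++ String.join (l.map f) := by
  rw [← List.foldl_map, foldl_str_append]

-- B's fold preserves the buffer length
theorem scatter_length (letra : String) (len : Nat) :
    ∀ (indices : List Int) (buf : List String),
      (indices.foldl (fun buf i => if 0 ≤ i ∧ i < (len : Int) then buf.set i.toNat letra else buf) buf).length = buf.length := by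
  intro indices
  induction indices with
  | nil => intro buf; rfl
  | cons i rest ih =>
    intro buf
    simp only [List.foldl]
    rw [ih]
    split <;> simp

-- characterisation of B's buffer at each position
theorem scatter_getElem? (letra : String) (len : Nat) :
    ∀ (indices : List Int) (buf : List String), buf.length = len → ∀ (k : Nat), k < len →
      (indices.foldl (fun buf i => if 0 ≤ i ∧ i < (len : Int) then buf.set i.toNat letra else buf) buf)[k]? =
        if (k : Int) ∈ indices then some letra else buf[k]? := by
  intro indices
  induction indices with
  | nil => intro buf _ k _; simp
  | cons i rest ih =>
    intro buf hb k hk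
    simp only [List.foldl]
    have hb' : (if 0 ≤ i ∧ i < (len : Int) then buf.set i.toNat letra else buf).length = len := by
      split <;> simp [hb]
    rw [ih _ hb' k hk]
    by_cases hr : (k : Int) ∈ rest
    · simp [hr, List.mem_cons]
    · rw [if_neg hr]
      by_cases hik : i = (k : Int)
      · have hg : 0 ≤ i ∧ i < (len : Int) := ⟨by omega, by omega⟩
        have hkb : k < buf.length := by omega
        have ht : i.toNat = k := by omega
        rw [if_pos (List.mem_cons.mpr (Or.inl hik.symm)), if_pos hg, ht,
            List.getElem?_set_self hkb]
      · have hmem : (k : Int) ∉ i :: rest := by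
          simp [List.mem_cons, hr]; exact fun h' => hik h'.symm
        rw [if_neg hmem]
        split
        · exact List.getElem?_set_ne (by omega)
        · rfl

theorem mostrar_letras_eq (letra : String) (indices : List Int) (lista_guiones : List Int) :
    mostrar_letras letra indices lista_guiones = mostrar_letras_alt letra indices lista_guiones := by
  show (List.range lista_guiones.length).foldl
      (fun acc n => acc ++ mlInner letra (Int.ofNat n) indices) "" =
    String.join (indices.foldl
      (fun buf i => if 0 ≤ i ∧ i < ((lista_guiones.length : Int)) then buf.set i.toNat letra else buf)
      (List.replicate lista_guiones.length "_"))
  rw [foldl_append_join]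
  have hbuf :
      (indices.foldl (fun buf i => if 0 ≤ i ∧ i < ((lista_guiones.length : Int)) then buf.set i.toNat letra else buf)
          (List.replicate lista_guiones.length "_"))
        = (List.range lista_guiones.length).map (fun n : Nat => mlInner letra (Int.ofNat n) indices) := by
    apply List.ext_getElem?
    intro k
    by_cases hk : k < lista_guiones.length
    · rw [scatter_getElem? letra lista_guiones.length indices _ (by simp) k hk,
          List.getElem?_map, List.getElem?_range hk, List.getElem?_replicate, if_pos hk]
      by_cases hm : (k : Int) ∈ indices <;> simp [hm, mlInner_eq]
    · have h1 : (indices.foldl (fun buf i => if 0 ≤ i ∧ i < ((lista_guiones.length : Int)) then buf.set i.toNat letra else buf) (List.replicate lista_guiones.length "_")).length ≤ k := by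
        rw [scatter_length]; simp; omega
      have h2 : ((List.range lista_guiones.length).map (fun n : Nat => mlInner letra (Int.ofNat n) indices)).length ≤ k := by
        simp; omega
      rw [List.getElem?_eq_none h1, List.getElem?_eq_none h2]
  rw [hbuf]
  simp

-- ===== VERDICT (by name: the statement is the Claim_ definition above) =====
theorem mostrar_letras_spec : Claim_equal_mostrar_letras := by
  intro letra indices lista_guiones _
  unfold Spec_mostrar_letras
  exact mostrar_letras_eq letra indices lista_guiones
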